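-- pv_equiv track=rewrite | github.com/willseyyyy/Cryptography-Concepts-CIA-assignment | cryptowills.py | myszkowski_encrypt
-- ===== SOURCE A (Python) =====
-- def myszkowski_encrypt(text, key):
--     order = sorted(list(set(key)), key=lambda x: (key.index(x), x))
--     indices = [order.index(k) for k in key]
--     columns = [[] for _ in range(len(key))]
--     for i, char in enumerate(text):
--         columns[i % len(key)].append(char)
--
--     result = ''
--     for val in sorted(set(indices)):
--         for i in range(len(indices)):
--             if indices[i] == val:
--                 result += ''.join(columns[i])
--     return result
-- ===== SOURCE B (Python) =====
-- def myszkowski_encrypt(text, key):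
--     columns = [[] for _ in range(len(key))]
--     for i, char in enumerate(text):
--         columns[i % len(key)].append(char)
--     groups = {}
--     for k, col in zip(key, columns):
--         groups.setdefault(k, []).append(col)
--     out = []
--     for cols in groups.values():
--         for col in cols:
--             out += col
--     return ''.join(out)
-- ===== Notes on version B (the rewrite author's own statement) =====
-- stated objective: alternative
-- what changed: The readout is rebuilt: instead of ranking each distinct key letter via sorted(set(key), key=first-index) plus order.index and then, for every rank, rescanning all key positions (O(k^2) nested scans), B makes one grouping pass over zip(key, columns) into an insertion-ordered dict and concatenates the groups in first-seen order; the round-robin distribution loop is unchanged.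
import Mathlib
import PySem

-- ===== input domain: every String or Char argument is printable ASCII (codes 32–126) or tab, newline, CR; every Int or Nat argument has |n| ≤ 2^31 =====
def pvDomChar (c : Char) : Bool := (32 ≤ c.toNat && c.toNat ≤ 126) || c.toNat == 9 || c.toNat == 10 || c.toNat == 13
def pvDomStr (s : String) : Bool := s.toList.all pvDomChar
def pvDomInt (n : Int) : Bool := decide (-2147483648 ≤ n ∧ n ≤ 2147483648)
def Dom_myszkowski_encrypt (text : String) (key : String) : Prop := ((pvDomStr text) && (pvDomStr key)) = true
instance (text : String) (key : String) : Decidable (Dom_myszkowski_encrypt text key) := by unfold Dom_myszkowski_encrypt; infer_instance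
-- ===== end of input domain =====

-- B replaces A's O(k^2) readout (for each rank of a distinct key letter, rescan every key position)
-- by a single grouping pass over zip(key, columns) into an insertion-ordered dict; the round-robin
-- distribution loop is the same in both programs (objective: alternative decomposition, no speed claim).

-- ===== PORT A =====
-- shared by both ports: the round-robin distribution loop, written identically in A and B
-- (columns[i % len(key)].append(char); Python raises ZeroDivisionError when key = '' and text ≠ '' — excluded by Pre_)
def pvColumns (text : String) (key : String) : List (List Char) :=
  (PySem.List.enumerate text.toList).foldl
    (fun cols p =>
      let j := (PySem.Int.mod p.1 ((key.toList.length : Int))).toNat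
      cols.set j (cols.getD j [] ++ [p.2]))
    (List.replicate key.toList.length [])

def myszkowski_encrypt (text : String) (key : String) : String :=
  let kc := key.toList
  -- order = sorted(list(set(key)), key=lambda x: (key.index(x), x))  (key.index x = find; x always occurs, so find ≥ 0)
  let order := PySem.List.sorted2 (PySem.Set.ofList kc) (fun x => PySem.Chars.find kc [x]) (fun x => x)
  -- indices = [order.index(k) for k in key]   (.index never raises here: every k ∈ order, so the getD fallback never fires)
  let indices : List Int := kc.map (fun k => ((PySem.List.index? order k).getD 0 : Int))
  let columns := pvColumns text key
  let result := (PySem.List.sorted (PySem.Set.ofList indices) (fun x => x)).foldl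
    (fun res val =>
      (PySem.List.pyRange 0 (indices.length : Int)).foldl
        (fun res i =>
          if PySem.List.pyGetD indices i 0 = val then res ++ PySem.List.pyGetD columns i [] else res)
        res)
    []
  String.ofList result

-- ===== PORT B =====
def myszkowski_encrypt_alt (text : String) (key : String) : String :=
  let columns := pvColumns text key
  let groups := (key.toList.zip columns).foldl
      (fun d p => d.modify p.1 [] (fun cols => cols ++ [p.2])) PySem.Dict.empty
  String.ofList (groups.values.foldl (fun out cols => cols.foldl (fun out col => out ++ col) out) [])

-- ===== PRECONDITION & SPEC =====
-- Pre_ excludes exactly the inputs where Python A raises ZeroDivisionError (empty key with nonempty text).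
def Pre_myszkowski_encrypt (text : String) (key : String) : Prop := key ≠ "" ∨ text = ""
instance (text : String) (key : String) : Decidable (Pre_myszkowski_encrypt text key) := by unfold Pre_myszkowski_encrypt; infer_instance
def pvWitness_myszkowski_encrypt : String × String := ("HELLOWORLD", "BABA")

def Spec_myszkowski_encrypt (text : String) (key : String) (out : String) : Prop := out = myszkowski_encrypt_alt text key
instance (text : String) (key : String) (out : String) : Decidable (Spec_myszkowski_encrypt text key out) := by unfold Spec_myszkowski_encrypt; infer_instance

-- ===== CLAIM (what is proved, stated in full; the proofs are below) =====
def Claim_equal_myszkowski_encrypt : Prop := ∀ (text : String) (key : String), Dom_myszkowski_encrypt text key → Pre_myszkowski_encrypt text key → Spec_myszkowski_encrypt text key (myszkowski_encrypt text key)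

-- ===== LEMMAS AND PROOFS =====

-- the common closed form both readouts are reduced to
def pvSpecForm (kc : List Char) (columns : List (List Char)) : List Char :=
  (PySem.List.dedup kc).flatMap
    (fun c => (((kc.zip columns).filter (fun p => p.1 == c)).map (fun p => p.2)).flatten)

theorem pvColumns_length_aux (l : List (Int × Char)) (n : ℕ) (cols : List (List Char)) :
    (l.foldl (fun cols p =>
      let j := (PySem.Int.mod p.1 ((n : Int))).toNat
      cols.set j (cols.getD j [] ++ [p.2])) cols).length = cols.length := by
  induction l generalizing cols with
  | nil => rfl
  | cons x t ih => rw [List.foldl_cons, ih]; simp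

theorem pvColumns_length (text key : String) : (pvColumns text key).length = key.toList.length := by
  rw [pvColumns, pvColumns_length_aux]; simp

-- minimality of idxOf on an arbitrary list
theorem pv_idxOf_min (kc : List Char) (x : Char) (j : ℕ) (hj : j < List.idxOf x kc) :
    kc[j]? ≠ some x := by
  induction kc generalizing j with
  | nil => simp
  | cons y t ih =>
    rw [List.idxOf_cons] at hj
    by_cases hyx : y = x
    · rw [beq_iff_eq.mpr hyx, cond_true] at hj; omega
    · rw [beq_eq_false_iff_ne.mpr hyx, cond_false] at hj
      cases j with
      | zero => simpa using hyx
      | succ k => simpa using ih k (by omega)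

theorem pv_singleton_prefix_drop (kc : List Char) (x : Char) (j : ℕ) :
    [x] <+: kc.drop j ↔ kc[j]? = some x := by
  constructor
  · rintro ⟨t, ht⟩
    by_cases hj : j < kc.length
    · rw [List.drop_eq_getElem_cons hj] at ht
      simp only [List.singleton_append, List.cons.injEq] at ht
      simp [List.getElem?_eq_getElem hj, ht.1]
    · rw [List.drop_eq_nil_of_le (by omega)] at ht; simp at ht
  · intro h
    have hj : j < kc.length := by
      by_contra hj; rw [List.getElem?_eq_none (by omega)] at h; simp at h
    rw [List.getElem?_eq_getElem hj] at h
    have h2 : kc[j] = x := by simpa using h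
    exact ⟨kc.drop (j+1), by rw [List.drop_eq_getElem_cons hj, h2]; rfl⟩

theorem pv_find_eq_idxOf (kc : List Char) (x : Char) (hx : x ∈ kc) :
    PySem.Chars.find kc [x] = (List.idxOf x kc : Int) := by
  have hinf : [x] <:+: kc := by
    obtain ⟨s, t, rfl⟩ := List.append_of_mem hx
    exact ⟨s, t, by simp⟩
  have h0 : 0 ≤ PySem.Chars.find kc [x] := (PySem.Chars.find_nonneg_iff kc [x]).2 hinf
  obtain ⟨hpre, hmin⟩ := PySem.Chars.find_spec h0
  set f := (PySem.Chars.find kc [x]).toNat with hf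
  have hfx : kc[f]? = some x := (pv_singleton_prefix_drop kc x f).1 hpre
  have hlt : List.idxOf x kc < kc.length := List.idxOf_lt_length_of_mem hx
  have hix : kc[List.idxOf x kc]? = some x := by
    rw [List.getElem?_eq_getElem hlt]
    exact congrArg some (List.getElem_idxOf hlt)
  have h1 : List.idxOf x kc ≤ f := by
    by_contra h
    exact pv_idxOf_min kc x f (by omega) hfx
  have h2 : f ≤ List.idxOf x kc := by
    by_contra h
    exact hmin (List.idxOf x kc) (by omega) ((pv_singleton_prefix_drop kc x _).2 hix)
  have : f = List.idxOf x kc := by omega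
  rw [← this, hf, Int.toNat_of_nonneg h0]

theorem pv_idxOf?_of_mem (D : List Char) (k : Char) (hk : k ∈ D) :
    List.idxOf? k D = some (List.idxOf k D) := by
  rw [List.idxOf?_eq_some_iff]
  have hlt : List.idxOf k D < D.length := List.idxOf_lt_length_of_mem hk
  refine ⟨hlt, List.getElem_idxOf hlt, fun j hj h => ?_⟩
  exact pv_idxOf_min D k j hj (by rw [List.getElem?_eq_getElem (by omega)]; exact congrArg some h)

theorem pv_idxOf_getD (D : List Char) (hnd : D.Nodup) (j : ℕ) (hj : j < D.length) :
    List.idxOf (D.getD j 'a') D = j := by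
  rw [List.getD_eq_getElem D 'a' hj]
  exact hnd.idxOf_getElem j hj

theorem pv_pairwise_idxOf (kc : List Char) :
    (PySem.Set.ofList kc).Pairwise (fun a b => List.idxOf a kc < List.idxOf b kc) := by
  induction kc using List.reverseRecOn with
  | nil => simp [PySem.Set.ofList]
  | append_singleton l c ih =>
    rw [PySem.Set.ofList_append_singleton]
    have hmem : ∀ a, a ∈ PySem.Set.ofList l → a ∈ l := fun a h => (PySem.Set.mem_ofList l a).1 h
    have hidx : ∀ a ∈ PySem.Set.ofList l, List.idxOf a (l ++ [c]) = List.idxOf a l := by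
      intro a ha; rw [List.idxOf_append]; simp [hmem a ha]
    have hinner : (PySem.Set.ofList l).Pairwise (fun a b => List.idxOf a (l ++ [c]) < List.idxOf b (l ++ [c])) :=
      ih.imp_of_mem (fun {a b} ha hb h => by rw [hidx a ha, hidx b hb]; exact h)
    by_cases hc : c ∈ PySem.Set.ofList l
    · simp only [PySem.Set.add, PySem.Set.contains]
      have : List.elem c (PySem.Set.ofList l) = true := by
        simpa [List.elem_iff] using hc
      simp only [this, if_pos]
      exact hinner
    · have hc' : c ∉ l := fun h => hc ((PySem.Set.mem_ofList l c).2 h)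
      have : List.elem c (PySem.Set.ofList l) = false := by
        simpa [List.elem_iff, PySem.Set.mem_ofList] using hc'
      simp only [PySem.Set.add, PySem.Set.contains, this, Bool.false_eq_true, if_false]
      rw [List.pairwise_append]
      refine ⟨hinner, by simp, ?_⟩
      intro a ha b hb
      have hb' : b = c := by simpa using hb
      subst hb'
      rw [hidx a ha, List.idxOf_append, if_neg hc']
      have hlt : List.idxOf a l < l.length := List.idxOf_lt_length_of_mem (hmem a ha)
      have h0 : List.idxOf b [b] = 0 := by simp
      omega

theorem pv_sorted2_eq_sorted_lex {α : Type} (xs : List α) (k1 : α → Int) (k2 : α → Char) :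
    PySem.List.sorted2 xs k1 k2 = PySem.List.sorted xs (fun x => toLex (k1 x, k2 x)) := by
  rw [PySem.List.sorted_eq_foldl_insertBy]
  show List.foldl (fun acc x => PySem.List.insertBy _ x acc) [] xs = _
  congr 1
  funext acc x
  congr 1
  funext a b
  show (decide (k1 a < k1 b) || (!decide (k1 b < k1 a) && decide (k2 a < k2 b)))
      = decide (toLex (k1 a, k2 a) < toLex (k1 b, k2 b))
  rcases lt_trichotomy (k1 a) (k1 b) with h | h | h
  · simp [h, Prod.Lex.lt_iff, not_lt_of_gt h]
  · simp [h, Prod.Lex.lt_iff]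
  · simp [h, Prod.Lex.lt_iff, not_lt_of_gt h, ne_of_gt h]

theorem pv_order_eq_dedup (kc : List Char) :
    PySem.List.sorted2 (PySem.Set.ofList kc) (fun x => PySem.Chars.find kc [x]) (fun x => x)
      = PySem.List.dedup kc := by
  rw [pv_sorted2_eq_sorted_lex, PySem.List.dedup_eq_ofList]
  apply PySem.List.sorted_eq_of_perm_of_pairwise_lt _ _ _ (List.Perm.refl _)
  refine (pv_pairwise_idxOf kc).imp_of_mem (fun {a b} ha hb h => ?_)
  have ha' : a ∈ kc := (PySem.Set.mem_ofList kc a).1 ha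
  have hb' : b ∈ kc := (PySem.Set.mem_ofList kc b).1 hb
  show toLex (PySem.Chars.find kc [a], a) < toLex (PySem.Chars.find kc [b], b)
  rw [Prod.Lex.lt_iff]
  left
  show PySem.Chars.find kc [a] < PySem.Chars.find kc [b]
  rw [pv_find_eq_idxOf kc a ha', pv_find_eq_idxOf kc b hb']
  exact_mod_cast h

theorem pv_ofList_map {α β : Type} [BEq α] [LawfulBEq α] [BEq β] [LawfulBEq β] (f : α → β) (l : List α)
    (hinj : ∀ a ∈ l, ∀ b ∈ l, f a = f b → a = b) :
    PySem.Set.ofList (l.map f) = (PySem.Set.ofList l).map f := by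
  induction l using List.reverseRecOn with
  | nil => simp [PySem.Set.ofList]
  | append_singleton t c ih =>
    have hinj' : ∀ a ∈ t, ∀ b ∈ t, f a = f b → a = b := fun a ha b hb =>
      hinj a (by simp [ha]) b (by simp [hb])
    rw [List.map_append, List.map_singleton, PySem.Set.ofList_append_singleton,
      PySem.Set.ofList_append_singleton, ih hinj']
    by_cases hc : c ∈ PySem.Set.ofList t
    · have hfc : f c ∈ (PySem.Set.ofList t).map f := List.mem_map_of_mem hc
      have hct : c ∈ t := (PySem.Set.mem_ofList t c).1 hc
      simp [PySem.Set.add, PySem.Set.contains, hct, hfc]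
    · have hc' : c ∉ t := fun h => hc ((PySem.Set.mem_ofList t c).2 h)
      have hfc : f c ∉ (PySem.Set.ofList t).map f := by
        intro h
        obtain ⟨a, ha, hfa⟩ := List.mem_map.1 h
        have ha' : a ∈ t := (PySem.Set.mem_ofList t a).1 ha
        exact hc' (hinj a (by simp [ha']) c (by simp) hfa ▸ ha')
      simp [PySem.Set.add, PySem.Set.contains, hc', hfc]

theorem pv_foldl_ite_append {α β : Type} (q : α → Prop) [DecidablePred q] (g : α → List β)
    (l : List α) (acc : List β) :
    l.foldl (fun r x => if q x then r ++ g x else r) acc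
      = acc ++ l.flatMap (fun x => if q x then g x else []) := by
  induction l generalizing acc with
  | nil => simp
  | cons x t ih => by_cases h : q x <;> simp [h, ih]

theorem pv_flatMap_range_zip {α β γ : Type} (xs : List α) (ys : List β) (dx : α) (dy : β)
    (g : α → β → List γ) (h : ys.length = xs.length) :
    (List.range xs.length).flatMap (fun j => g (xs.getD j dx) (ys.getD j dy))
      = (xs.zip ys).flatMap (fun p => g p.1 p.2) := by
  induction xs generalizing ys g with
  | nil => simp
  | cons x t ih =>
    cases ys with
    | nil => simp at h
    | cons y u =>
      simp only [List.length_cons, List.range_succ_eq_map, List.flatMap_cons, List.flatMap_map,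
        List.zip_cons_cons]
      simp only [List.getD_cons_zero, List.getD_cons_succ, Nat.succ_eq_add_one]
      have h' : u.length = t.length := by simpa using h
      rw [ih u (fun a b => g a b) h']

theorem pv_flatMap_eq_range {α γ : Type} (l : List α) (d : α) (g : α → List γ) :
    l.flatMap g = (List.range l.length).flatMap (fun j => g (l.getD j d)) := by
  induction l generalizing g with
  | nil => simp
  | cons x t ih =>
    simp only [List.length_cons, List.range_succ_eq_map, List.flatMap_cons, List.flatMap_map,
      List.getD_cons_zero, List.getD_cons_succ]
    rw [← ih]

theorem pv_flatten_filter_map {α β : Type} (q : α → Bool) (g : α → List β) (l : List α) :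
    ((l.filter q).map g).flatten = (l.map (fun x => if q x then g x else [])).flatten := by
  induction l with
  | nil => rfl
  | cons x t ih => by_cases h : q x <;> simp [h, ih]

-- A's readout equals the closed form
theorem pv_A_eq_spec (text key : String) :
    (myszkowski_encrypt text key).toList = pvSpecForm key.toList (pvColumns text key) := by
  simp only [myszkowski_encrypt, String.toList_ofList]
  set kc := key.toList with hkc
  set cols := pvColumns text key with hcols
  have hlen : cols.length = kc.length := pvColumns_length text key
  rw [pv_order_eq_dedup kc]
  set D := PySem.List.dedup kc with hD
  have hndD : D.Nodup := by
    rw [hD, PySem.List.dedup_eq_ofList]; exact PySem.Set.nodup_ofList kc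
  have hmemD : ∀ k ∈ kc, k ∈ D := by
    intro k hk
    rw [hD, PySem.List.dedup_eq_ofList]
    exact (PySem.Set.mem_ofList kc k).2 hk
  set f : Char → Int := fun k => (List.idxOf k D : Int) with hf
  have hidx : kc.map (fun k => ((PySem.List.index? D k).getD 0 : Int)) = kc.map f := by
    apply List.map_congr_left; intro k hk
    rw [PySem.List.index?_eq_idxOf?, pv_idxOf?_of_mem D k (hmemD k hk)]; rfl
  rw [hidx]
  set indices := kc.map f with hind
  have hinj : ∀ a ∈ kc, ∀ b ∈ kc, f a = f b → a = b := by
    intro a ha b hb h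
    have ha' := hmemD a ha
    have hb' := hmemD b hb
    have heq : List.idxOf a D = List.idxOf b D := by
      simp only [hf] at h
      exact_mod_cast h
    have h1 := List.getElem_idxOf (List.idxOf_lt_length_of_mem ha')
    have h2 := List.getElem_idxOf (List.idxOf_lt_length_of_mem hb')
    rw [← h1, ← h2]
    congr 1
  have hofmap : PySem.Set.ofList indices = D.map f := by
    rw [hind, pv_ofList_map f kc hinj, ← PySem.List.dedup_eq_ofList, ← hD]
  have hDmap : D.map f = (List.range D.length).map (fun j => (Nat.cast j : Int)) := by
    apply List.ext_getElem (by simp)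
    intro i h1 h2
    simp only [List.getElem_map, List.getElem_range, hf]
    exact congrArg (fun n : ℕ => (n : Int)) (hndD.idxOf_getElem i (by simpa using h1))
  have hsorted : PySem.List.sorted (PySem.Set.ofList indices) (fun x => x)
      = (List.range D.length).map (fun j => (Nat.cast j : Int)) := by
    have hperm : ((List.range D.length).map (fun j => (Nat.cast j : Int))).Perm (PySem.Set.ofList indices) := by
      rw [hofmap, hDmap]
    have hpw : ((List.range D.length).map (fun j => (Nat.cast j : Int))).Pairwise (fun a b => a < b) := by
      rw [List.pairwise_map]
      exact List.pairwise_lt_range.imp (by intro a b h; exact_mod_cast h)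
    exact PySem.List.sorted_eq_of_perm_of_pairwise_lt _ _ _ hperm hpw
  rw [hsorted]
  set Z := kc.zip cols with hZ
  have hn : cols.length = indices.length := by rw [hind]; simpa using hlen
  have hinner : ∀ (res : List Char) (val : Int),
      (PySem.List.pyRange 0 (indices.length : Int)).foldl
        (fun res i => if PySem.List.pyGetD indices i 0 = val then res ++ PySem.List.pyGetD cols i [] else res) res
      = res ++ Z.flatMap (fun p => if f p.1 = val then p.2 else []) := by
    intro res val
    rw [PySem.List.pyRange_zero_natCast, List.foldl_map]
    have hbody : (fun (res : List Char) (j : ℕ) =>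
          if PySem.List.pyGetD indices (↑j) 0 = val then res ++ PySem.List.pyGetD cols (↑j) [] else res)
        = fun res j => if indices.getD j 0 = val then res ++ cols.getD j [] else res := by
      funext res j
      rw [PySem.List.pyGetD_natCast, PySem.List.pyGetD_natCast]
    rw [hbody,
      pv_foldl_ite_append (fun j => indices.getD j 0 = val) (fun j => cols.getD j []) (List.range indices.length) res,
      pv_flatMap_range_zip indices cols 0 [] (fun a b => if a = val then b else []) hn,
      hind, List.zip_map_left, List.flatMap_map]
    simp only [Prod.map_fst, Prod.map_snd, id_eq, hZ]
  have hfun2 : (fun (res : List Char) (val : Int) =>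
        (PySem.List.pyRange 0 (indices.length : Int)).foldl
          (fun res i => if PySem.List.pyGetD indices i 0 = val then res ++ PySem.List.pyGetD cols i [] else res) res)
      = fun res val => res ++ Z.flatMap (fun p => if f p.1 = val then p.2 else []) := by
    funext res val
    exact hinner res val
  rw [hfun2, PySem.List.foldl_append_eq_flatMap, List.nil_append]
  rw [pvSpecForm, pv_flatMap_eq_range D 'a'
      (fun c => ((Z.filter (fun p => p.1 == c)).map (fun p => p.2)).flatten)]
  simp only [List.flatMap_def, List.map_map]
  congr 1
  apply List.map_congr_left
  intro j hj
  rw [List.mem_range] at hj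
  simp only [Function.comp]
  rw [pv_flatten_filter_map (fun p => p.1 == D.getD j 'a') (fun p => p.2) Z]
  congr 1
  apply List.map_congr_left
  intro p hp
  have hp1 : p.1 ∈ kc := (List.of_mem_zip hp).1
  have hmem : p.1 ∈ D := hmemD _ hp1
  by_cases hcond : List.idxOf p.1 D = j
  · have hpd : p.1 = D.getD j 'a' := by
      rw [← hcond, List.getD_eq_getElem D 'a' (hcond ▸ List.idxOf_lt_length_of_mem hmem), List.getElem_idxOf]
    have c1 : f p.1 = ((j : ℕ) : Int) := by rw [hf]; show (List.idxOf p.1 D : Int) = _; exact_mod_cast hcond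
    have c2 : (p.1 == D.getD j 'a') = true := by rw [← hpd]; exact beq_self_eq_true p.1
    rw [if_pos c1, c2]
    simp
  · have hpd : p.1 ≠ D.getD j 'a' := fun h => hcond (by rw [h]; exact pv_idxOf_getD D hndD j hj)
    have hfc : ¬ (f p.1 = (j : Int)) := by
      simp only [hf]
      exact_mod_cast hcond
    have c2 : (p.1 == D.getD j 'a') = false := by simpa using hpd
    rw [if_neg hfc, c2]
    simp

-- B's readout equals the closed form
theorem pv_B_eq_spec (text key : String) :
    (myszkowski_encrypt_alt text key).toList = pvSpecForm key.toList (pvColumns text key) := by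
  simp only [myszkowski_encrypt_alt, String.toList_ofList]
  set kc := key.toList with hkc
  set cols := pvColumns text key with hcols
  set Z := kc.zip cols with hZ
  set G := Z.foldl (fun d p => d.modify p.1 [] (fun c => c ++ [p.2])) PySem.Dict.empty with hG
  have hout : G.values.foldl (fun out cs => cs.foldl (fun o c => o ++ c) out) []
      = G.values.flatMap List.flatten := by
    have hfun : (fun (out : List Char) (cs : List (List Char)) => cs.foldl (fun o c => o ++ c) out)
        = fun out cs => out ++ cs.flatten := by
      funext out cs
      simpa using PySem.List.foldl_append_eq_flatMap (fun c => c) cs out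
    rw [hfun, PySem.List.foldl_append_eq_flatMap]
    simp
  have hlen : cols.length = kc.length := pvColumns_length text key
  have hfst : Z.map Prod.fst = kc := List.map_fst_zip (le_of_eq hlen.symm)
  have hupd : PySem.Set.update ([] : PySem.Set Char) kc = PySem.Set.ofList kc := by
    rw [PySem.Set.ofList_eq_foldl]; rfl
  have hkeys : G.keys = PySem.List.dedup kc := by
    rw [hG, PySem.Dict.keys_foldl_modify_key Z Prod.fst [] (fun _ p => fun c => c ++ [p.2]),
      PySem.Dict.keys_empty, hfst, hupd, PySem.List.dedup_eq_ofList]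
  have hnd : G.keys.Nodup := by rw [hkeys, PySem.List.dedup_eq_ofList]; exact PySem.Set.nodup_ofList kc
  have hvals : G.values = G.keys.map (fun k => G.getD k []) := PySem.Dict.values_eq_map_keys G hnd []
  have hgetD : ∀ c, G.getD c [] = (Z.filter (fun p => p.1 == c)).map (fun p => p.2) := by
    intro c
    rw [hG, PySem.Dict.getD_foldl_modify_append Z PySem.Dict.empty c, PySem.Dict.getD_empty]
    simp
  rw [hout, hvals, hkeys, List.flatMap_map]
  rw [pvSpecForm, List.flatMap_def, List.flatMap_def]
  congr 1
  apply List.map_congr_left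
  intro c _
  rw [hgetD c]

-- ===== VERDICT (by name: the statement is the Claim_ definition above) =====
theorem myszkowski_encrypt_spec : Claim_equal_myszkowski_encrypt := by
  intro text key _ _
  exact String.toList_inj.mp ((pv_A_eq_spec text key).trans (pv_B_eq_spec text key).symm)
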